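-- pv_equiv track=rewrite | github.com/timrozday/group-matches | group_matches/group_matches.py | detect_path_overlaps
-- ===== SOURCE A (Python) =====
-- import itertools as it
--
-- def detect_path_overlaps(exact_path_groups):
--     overlaps = set()
--     for p1,p2 in it.combinations(exact_path_groups.keys(),2):
--         p1_set = set(p1)
--         p2_set = set(p2)
--         if len(p1_set - p2_set) == 0:  # p1 subset of p2
--             overlaps.add((p1,'subset',p2))
--             continue
--         if len(p2_set - p1_set) == 0:  # p2 subset of p1
--             overlaps.add((p2,'subset',p1))
--             continue
--         if p2_set & p1_set:  # overlap
--             overlaps.add((p1,'overlap',p2))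
--             continue
--
--     return overlaps
-- ===== SOURCE B (Python) =====
-- import itertools as it
--
-- def detect_path_overlaps(exact_path_groups):
--     # Inverted index element -> key indices; co-occurrence counter gives every
--     # intersection cardinality at once, so classifying a pair costs one dict
--     # lookup instead of building two sets and three set operations.
--     keys = list(exact_path_groups.keys())
--     sizes = []
--     index = {}
--     for i, k in enumerate(keys):
--         elems = list(dict.fromkeys(k))  # distinct elements, in order
--         sizes.append(len(elems))
--         for e in elems:
--             index.setdefault(e, []).append(i)
--     counts = {}
--     for ids in index.values():
--         for i, j in it.combinations(ids, 2):
--             counts[(i, j)] = counts.get((i, j), 0) + 1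
--     out = set()
--     n = len(keys)
--     for i in range(n):
--         for j in range(i + 1, n):
--             c = counts.get((i, j), 0)
--             if c == sizes[i]:
--                 out.add((keys[i], 'subset', keys[j]))
--             elif c == sizes[j]:
--                 out.add((keys[j], 'subset', keys[i]))
--             elif c:
--                 out.add((keys[i], 'overlap', keys[j]))
--     return out
-- ===== Notes on version B (the rewrite author's own statement) =====
-- stated objective: faster
-- what changed: B replaces A's per-pair set algebra with an inverted index (element -> key indices) whose posting lists feed a co-occurrence counter, so every intersection cardinality is precomputed and each pair is classified by one dict lookup against the two precomputed sizes.
import Mathlib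
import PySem

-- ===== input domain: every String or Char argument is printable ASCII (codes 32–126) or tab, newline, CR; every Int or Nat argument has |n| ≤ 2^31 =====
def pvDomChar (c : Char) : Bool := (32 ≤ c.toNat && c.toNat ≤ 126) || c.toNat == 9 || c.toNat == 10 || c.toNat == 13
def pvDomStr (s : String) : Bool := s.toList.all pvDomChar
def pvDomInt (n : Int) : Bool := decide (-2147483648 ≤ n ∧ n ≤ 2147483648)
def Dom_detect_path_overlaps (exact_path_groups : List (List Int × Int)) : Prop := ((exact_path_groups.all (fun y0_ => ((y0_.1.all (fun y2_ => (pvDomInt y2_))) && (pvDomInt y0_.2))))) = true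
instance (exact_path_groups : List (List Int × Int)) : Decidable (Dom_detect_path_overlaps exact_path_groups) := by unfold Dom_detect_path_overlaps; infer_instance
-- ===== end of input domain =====

-- B replaces A's per-pair set algebra with an inverted index (element -> key indices)
-- feeding a co-occurrence counter, so each pair is classified by one dict lookup
-- against precomputed sizes instead of building two sets and three set operations.

-- ===== PORT A =====
-- loop body of 'for p1,p2 in it.combinations(exact_path_groups.keys(),2): …'
def pvStepA (overlaps : List (List Int × String × List Int)) (c : List (List Int)) :
    List (List Int × String × List Int) :=
  match c with
  | [p1, p2] =>
    let p1_set : PySem.Set Int := PySem.Set.ofList p1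
    let p2_set : PySem.Set Int := PySem.Set.ofList p2
    if PySem.Set.len (PySem.Set.diff p1_set p2_set) = 0 then
      PySem.Set.add overlaps (p1, "subset", p2)
    else if PySem.Set.len (PySem.Set.diff p2_set p1_set) = 0 then
      PySem.Set.add overlaps (p2, "subset", p1)
    else if PySem.Set.inter p2_set p1_set ≠ [] then
      PySem.Set.add overlaps (p1, "overlap", p2)
    else overlaps
  | _ => overlaps

def detect_path_overlaps (exact_path_groups : List (List Int × Int)) :
    List (List Int × String × List Int) :=
  (PySem.List.combinations (PySem.List.dedup (exact_path_groups.map Prod.fst)) 2).foldl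
    pvStepA PySem.Set.empty

-- ===== PORT B =====
-- 'for i, k in enumerate(keys): elems = list(dict.fromkeys(k)); sizes.append(len(elems));
--  for e in elems: index.setdefault(e, []).append(i)'  — state (sizes, index)
def pvBuildIndex (keys : List (List Int)) : List Int × PySem.Dict Int (List Int) :=
  (PySem.List.enumerate keys 0).foldl
    (fun st ik =>
      let elems := PySem.List.dedup ik.2
      (st.1 ++ [(elems.length : Int)],
       elems.foldl (fun d e => d.modify e [] (· ++ [ik.1])) st.2))
    ([], PySem.Dict.empty)

-- 'for ids in index.values(): for i, j in it.combinations(ids, 2): counts[(i,j)] = counts.get((i,j),0) + 1'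
def pvBuildCounts (index : PySem.Dict Int (List Int)) : PySem.Dict (Int × Int) Int :=
  index.values.foldl
    (fun c ids => (PySem.List.combinations ids 2).foldl
      (fun c pr => match pr with
        | [i, j] => c.modify (i, j) 0 (· + 1)
        | _ => c) c)
    PySem.Dict.empty

def detect_path_overlaps_alt (exact_path_groups : List (List Int × Int)) :
    List (List Int × String × List Int) :=
  let keys := PySem.List.dedup (exact_path_groups.map Prod.fst)
  let st := pvBuildIndex keys
  let counts := pvBuildCounts st.2
  (PySem.List.pyRange 0 (PySem.List.len keys)).foldl
    (fun out i => (PySem.List.pyRange (i + 1) (PySem.List.len keys)).foldl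
      (fun out j =>
        let c := counts.getD (i, j) 0
        if c = PySem.List.pyGetD st.1 i 0 then
          PySem.Set.add out (PySem.List.pyGetD keys i [], "subset", PySem.List.pyGetD keys j [])
        else if c = PySem.List.pyGetD st.1 j 0 then
          PySem.Set.add out (PySem.List.pyGetD keys j [], "subset", PySem.List.pyGetD keys i [])
        else if c ≠ 0 then
          PySem.Set.add out (PySem.List.pyGetD keys i [], "overlap", PySem.List.pyGetD keys j [])
        else out)
      out)
    PySem.Set.empty

-- ===== PRECONDITION & SPEC =====
def Spec_detect_path_overlaps (exact_path_groups : List (List Int × Int)) (out : List (List Int × String × List Int)) : Prop := out = detect_path_overlaps_alt exact_path_groups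
instance (exact_path_groups : List (List Int × Int)) (out : List (List Int × String × List Int)) : Decidable (Spec_detect_path_overlaps exact_path_groups out) := by unfold Spec_detect_path_overlaps; infer_instance

-- ===== CLAIM (what is proved, stated in full; the proofs are below) =====
def Claim_equal_detect_path_overlaps : Prop := ∀ (exact_path_groups : List (List Int × Int)), Dom_detect_path_overlaps exact_path_groups → Spec_detect_path_overlaps exact_path_groups (detect_path_overlaps exact_path_groups)

-- ===== LEMMAS AND PROOFS =====

def pvFlatG (ks : List (List Int)) (s : Int) : List (Int × Int) :=
  (PySem.List.enumerate ks s).flatMap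
    (fun ik => (PySem.List.dedup ik.2).map (fun e => (e, ik.1)))

lemma pvBuildIndex_eq (ks : List (List Int)) (s : Int) (sz : List Int)
    (d : PySem.Dict Int (List Int)) :
    (PySem.List.enumerate ks s).foldl
      (fun st ik =>
        let elems := PySem.List.dedup ik.2
        (st.1 ++ [(elems.length : Int)],
         elems.foldl (fun d e => d.modify e [] (· ++ [ik.1])) st.2))
      (sz, d)
    = (sz ++ ks.map (fun k => ((PySem.List.dedup k).length : Int)),
       (pvFlatG ks s).foldl (fun d p => d.modify p.1 [] (· ++ [p.2])) d) := by
  induction ks generalizing s sz d with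
  | nil => simp [pvFlatG, PySem.List.enumerate_nil]
  | cons k ks ih =>
    rw [PySem.List.enumerate_cons]
    simp only [List.foldl_cons]
    rw [ih]
    simp only [pvFlatG, PySem.List.enumerate_cons, List.flatMap_cons, List.foldl_append,
      List.map_cons, Prod.mk.injEq]
    exact ⟨by simp, by rw [List.foldl_map]⟩

def pvPostings (keys : List (List Int)) (e : Int) : List Int :=
  ((PySem.List.enumerate keys 0).filter (fun ik => e ∈ PySem.List.dedup ik.2)).map (·.1)

lemma pvFlatG_cons (k : List Int) (ks : List (List Int)) (s : Int) :
    pvFlatG (k :: ks) s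
      = (PySem.List.dedup k).map (fun e => (e, s)) ++ pvFlatG ks (s + 1) := by
  simp [pvFlatG, PySem.List.enumerate_cons]

lemma pvFlatG_filter (ks : List (List Int)) (s : Int) (e : Int) :
    ((pvFlatG ks s).filter (fun p => p.1 == e)).map (·.2)
      = ((PySem.List.enumerate ks s).filter (fun ik => e ∈ PySem.List.dedup ik.2)).map (·.1) := by
  induction ks generalizing s with
  | nil => simp [pvFlatG, PySem.List.enumerate_nil]
  | cons k ks ih =>
    have hnd : (PySem.List.dedup k).Nodup := by
      rw [PySem.List.dedup_eq_ofList]; exact PySem.Set.nodup_ofList k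
    have hhead : ((((PySem.List.dedup k).map (fun e' => (e', s))).filter
        (fun p => p.1 == e)).map (·.2)) = if e ∈ PySem.List.dedup k then [s] else [] := by
      rw [List.filter_map, List.map_map]
      simp only [PySem.List.dedup_eq_ofList] at hnd ⊢
      by_cases he : e ∈ PySem.Set.ofList k
      · have hf : (PySem.Set.ofList k).filter (fun x => x == e) = [e] := by
          rw [List.filter_beq, List.count_eq_one_of_mem hnd he, List.replicate_one]
        simp only [Function.comp_def, he, if_true]
        simp [hf]
      · have hf : (PySem.Set.ofList k).filter (fun x => x == e) = [] := by
          simp only [List.filter_eq_nil_iff, beq_iff_eq]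
          exact fun a ha h => he (h ▸ ha)
        simp only [Function.comp_def, he, if_false]
        simp [hf]
    rw [pvFlatG_cons, List.filter_append, List.map_append, hhead,
      PySem.List.enumerate_cons, List.filter_cons, ih]
    by_cases he : e ∈ k <;> simp [he]

def pvToPair (pr : List Int) : Option (Int × Int) :=
  match pr with | [i, j] => some (i, j) | _ => none

def pvPairsOf (ids : List Int) : List (Int × Int) :=
  (PySem.List.combinations ids 2).filterMap pvToPair

lemma pvMapPair (x : Int) (xs : List Int) :
    (xs.map (fun y => [x, y])).filterMap pvToPair = xs.map (fun y => (x, y)) := by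
  induction xs with
  | nil => rfl
  | cons y ys ih => simp [pvToPair, ih]

lemma pvPairsOf_cons (x : Int) (xs : List Int) :
    pvPairsOf (x :: xs) = xs.map (fun y => (x, y)) ++ pvPairsOf xs := by
  rw [pvPairsOf, PySem.List.combinations_cons_succ, PySem.List.combinations_one,
    List.filterMap_append, List.map_map]
  congr 1
  exact pvMapPair x xs

lemma pvPairsOf_count (ids : List Int) (h : ids.Pairwise (· < ·)) (a b : Int) (hab : a < b) :
    (pvPairsOf ids).count (a, b) = if a ∈ ids ∧ b ∈ ids then 1 else 0 := by
  induction ids with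
  | nil => simp [pvPairsOf, PySem.List.combinations_nil_succ]
  | cons x xs ih =>
    rw [List.pairwise_cons] at h
    have hlt := h.1
    have hnd : xs.Nodup := h.2.nodup
    rw [pvPairsOf_cons, List.count_append, ih h.2]
    by_cases hx : x = a
    · subst hx
      have hax : x ∉ xs := fun hm => lt_irrefl x (hlt x hm)
      have hcm : (xs.map (fun y => (x, y))).count (x, b) = xs.count b :=
        List.count_map_of_injective xs (fun y => (x, y)) (fun u v huv => by simpa using huv) b
      rw [hcm]
      by_cases hbx : b ∈ xs
      · rw [List.count_eq_one_of_mem hnd hbx]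
        simp [hax, hbx, List.mem_cons]
      · rw [List.count_eq_zero_of_not_mem hbx]
        have hbne : b ≠ x := ne_of_gt hab
        simp [hax, hbx, hbne, List.mem_cons]
    · have hcm : (xs.map (fun y => (x, y))).count (a, b) = 0 := by
        rw [List.count_eq_zero]
        intro hm
        rcases List.mem_map.1 hm with ⟨y, _, hy⟩
        exact hx (congrArg Prod.fst hy)
      rw [hcm]
      by_cases hax : a ∈ xs
      · have hbx : b ≠ x := fun hbe => by
          have := hlt a hax
          omega
        simp [List.mem_cons, hax, hbx, (show a ≠ x from fun h' => hx h'.symm)]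
      · simp [List.mem_cons, hax, (show a ≠ x from fun h' => hx h'.symm)]

lemma pvPostings_pairwise (keys : List (List Int)) (e : Int) :
    (pvPostings keys e).Pairwise (· < ·) := by
  apply List.Pairwise.map
  · exact fun p q h => h
  · exact (PySem.List.pairwise_lt_enumerate keys 0).filter _

lemma pvPostings_mem (keys : List (List Int)) (e : Int) (a : Nat) :
    (a : Int) ∈ pvPostings keys e ↔ ∃ _ : a < keys.length, e ∈ keys[a] := by
  unfold pvPostings
  rw [List.mem_map]
  constructor
  · rintro ⟨ik, hm, hfst⟩
    rw [List.mem_filter] at hm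
    rcases (PySem.List.mem_enumerate_iff keys 0 ik).1 hm.1 with ⟨k, hk, hik⟩
    subst hik
    simp only at hfst
    have : k = a := by
      have := hfst
      omega
    subst this
    refine ⟨hk, ?_⟩
    have := hm.2
    simpa [PySem.List.dedup_eq_ofList, PySem.Set.mem_ofList] using this
  · rintro ⟨ha, he⟩
    refine ⟨((a : Int), keys[a]), ?_, rfl⟩
    rw [List.mem_filter]
    constructor
    · exact (PySem.List.mem_enumerate_iff keys 0 _).2 ⟨a, ha, by simp⟩
    · simpa [PySem.List.dedup_eq_ofList, PySem.Set.mem_ofList] using he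

-- counts dict is the counter of all generated pairs
lemma pvFoldMatch (l : List (List Int)) (c : PySem.Dict (Int × Int) Int) :
    l.foldl (fun c pr => match pr with
        | [i, j] => c.modify (i, j) 0 (· + 1)
        | _ => c) c
    = (l.filterMap pvToPair).foldl (fun c p => c.modify p 0 (· + 1)) c := by
  induction l generalizing c with
  | nil => rfl
  | cons pr rest ih =>
    match pr with
    | [] => simpa [List.filterMap_cons, pvToPair] using ih c
    | [i] => simpa [List.filterMap_cons, pvToPair] using ih c
    | [i, j] => simpa [List.filterMap_cons, pvToPair] using ih _
    | i :: j :: k :: t => simpa [List.filterMap_cons, pvToPair] using ih c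

lemma pvBuildIndex_fst (keys : List (List Int)) :
    (pvBuildIndex keys).1 = keys.map (fun k => ((PySem.List.dedup k).length : Int)) := by
  rw [pvBuildIndex, pvBuildIndex_eq]; simp

lemma pvBuildIndex_snd (keys : List (List Int)) :
    (pvBuildIndex keys).2 =
      (pvFlatG keys 0).foldl (fun d p => d.modify p.1 [] (· ++ [p.2])) PySem.Dict.empty := by
  rw [pvBuildIndex, pvBuildIndex_eq]

lemma pvIndex_getD (keys : List (List Int)) (e : Int) :
    ((pvBuildIndex keys).2).getD e [] = pvPostings keys e := by
  rw [pvBuildIndex_snd, PySem.Dict.getD_foldl_modify_append, pvPostings, ← pvFlatG_filter]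
  simp

lemma pvIndex_keys (keys : List (List Int)) :
    ((pvBuildIndex keys).2).keys = PySem.Set.ofList ((pvFlatG keys 0).map (·.1)) := by
  rw [pvBuildIndex_snd, PySem.Dict.keys_foldl_modify_key ((pvFlatG keys 0)) Prod.fst []
    (fun _ p => (· ++ [p.2])) PySem.Dict.empty]
  simp [PySem.Dict.keys_empty, PySem.Set.update_nil_left]

lemma pvIndex_keys_nodup (keys : List (List Int)) : ((pvBuildIndex keys).2).keys.Nodup := by
  rw [pvIndex_keys]; exact PySem.Set.nodup_ofList _

lemma pvIndex_mem_keys (keys : List (List Int)) (e : Int) :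
    e ∈ ((pvBuildIndex keys).2).keys ↔ ∃ a : Nat, ∃ _ : a < keys.length, e ∈ keys[a] := by
  rw [pvIndex_keys, PySem.Set.mem_ofList, List.mem_map]
  constructor
  · rintro ⟨p, hp, hfst⟩
    simp only [pvFlatG, List.mem_flatMap] at hp
    rcases hp with ⟨ik, hik, hpm⟩
    rcases (PySem.List.mem_enumerate_iff keys 0 ik).1 hik with ⟨k, hk, hikv⟩
    subst hikv
    rcases List.mem_map.1 hpm with ⟨e', he', hpe⟩
    refine ⟨k, hk, ?_⟩
    have : e' = e := by rw [← hfst, ← hpe]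
    subst this
    simpa [PySem.List.dedup_eq_ofList, PySem.Set.mem_ofList] using he'
  · rintro ⟨a, ha, he⟩
    refine ⟨(e, (a : Int)), ?_, rfl⟩
    simp only [pvFlatG, List.mem_flatMap]
    refine ⟨((a : Int), keys[a]), (PySem.List.mem_enumerate_iff keys 0 _).2 ⟨a, ha, by simp⟩, ?_⟩
    exact List.mem_map.2 ⟨e, by simpa [PySem.List.dedup_eq_ofList, PySem.Set.mem_ofList] using he, rfl⟩

lemma pvCounts_eq_counter (index : PySem.Dict Int (List Int)) :
    pvBuildCounts index = PySem.Dict.counter (index.values.flatMap pvPairsOf) := by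
  rw [PySem.Dict.counter_eq_foldl, pvBuildCounts, List.foldl_flatMap]
  apply PySem.List.foldl_congr_mem
  intro c ids _
  exact pvFoldMatch _ c

lemma pvCountFlat {α β : Type} [BEq β] (f : α → List β) (l : List α) (v : β) :
    (l.flatMap f).count v = (l.map (fun x => (f x).count v)).sum := by
  induction l with
  | nil => rfl
  | cons x xs ih => simp [List.flatMap_cons, List.count_append, ih]

lemma pvSumIte {α : Type} (l : List α) (p : α → Prop) [DecidablePred p] :
    (l.map (fun e => if p e then 1 else 0)).sum = l.countP (fun e => decide (p e)) := by
  induction l with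
  | nil => rfl
  | cons x xs ih => by_cases h : p x <;> simp [h, ih] <;> omega

lemma pvCounts_getD (keys : List (List Int)) (a b : Nat) (ha : a < keys.length)
    (hb : b < keys.length) (hab : a < b) :
    (pvBuildCounts (pvBuildIndex keys).2).getD ((a : Int), (b : Int)) 0 =
      ((PySem.Set.inter (PySem.Set.ofList keys[a]) (PySem.Set.ofList keys[b])).length : Int) := by
  rw [pvCounts_eq_counter, PySem.Dict.getD_counter]
  congr 1
  rw [pvCountFlat]
  have hvals : ((pvBuildIndex keys).2).values
      = ((pvBuildIndex keys).2).keys.map (fun e => pvPostings keys e) := by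
    rw [PySem.Dict.values_eq_map_keys _ (pvIndex_keys_nodup keys) []]
    exact List.map_congr_left (fun e _ => pvIndex_getD keys e)
  rw [hvals, List.map_map]
  have hterm : ∀ e ∈ ((pvBuildIndex keys).2).keys,
      ((fun x => (pvPairsOf x).count ((a : Int), (b : Int))) ∘ fun e => pvPostings keys e) e
        = if e ∈ keys[a] ∧ e ∈ keys[b] then 1 else 0 := by
    intro e _
    simp only [Function.comp_def]
    rw [pvPairsOf_count (pvPostings keys e) (pvPostings_pairwise keys e) _ _ (by exact_mod_cast hab)]
    simp only [pvPostings_mem keys e a, pvPostings_mem keys e b]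
    by_cases h1 : e ∈ keys[a] <;> by_cases h2 : e ∈ keys[b] <;> simp [h1, h2, ha, hb]
  rw [List.map_congr_left hterm, pvSumIte]
  -- countP over the nodup key list = length of the intersection list
  have hnd : (((pvBuildIndex keys).2).keys.filter
      (fun e => decide (e ∈ keys[a] ∧ e ∈ keys[b]))).Nodup :=
    (pvIndex_keys_nodup keys).filter _
  have hndi : (PySem.Set.inter (PySem.Set.ofList keys[a]) (PySem.Set.ofList keys[b])).Nodup := by
    unfold PySem.Set.inter
    exact (PySem.Set.nodup_ofList _).filter _
  rw [List.countP_eq_length_filter]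
  apply List.Perm.length_eq
  rw [List.perm_ext_iff_of_nodup hnd hndi]
  intro e
  rw [List.mem_filter, PySem.Set.mem_inter, PySem.Set.mem_ofList, PySem.Set.mem_ofList,
    pvIndex_mem_keys]
  constructor
  · rintro ⟨_, h⟩
    simpa using h
  · rintro ⟨h1, h2⟩
    exact ⟨⟨a, ha, h1⟩, by simp [h1, h2]⟩

-- ---- the three branch tests of A, re-read on the single cardinality |s1 ∩ s2| ----

lemma pv_diff_iff_inter_left (s1 s2 : List Int) :
    (PySem.Set.diff s1 s2).length = 0 ↔ (PySem.Set.inter s1 s2).length = s1.length := by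
  have h : (PySem.Set.inter s1 s2).length + (PySem.Set.diff s1 s2).length = s1.length := by
    unfold PySem.Set.inter PySem.Set.diff
    induction s1 with
    | nil => rfl
    | cons x xs ih => by_cases h : x ∈ s2 <;> simp [h] at ih ⊢ <;> omega
  omega

lemma pv_inter_comm_nil (s1 s2 : List Int) :
    PySem.Set.inter s2 s1 = [] ↔ (PySem.Set.inter s1 s2).length = 0 := by
  rw [List.length_eq_zero_iff]
  simp only [PySem.Set.inter, List.filter_eq_nil_iff, PySem.Set.contains]
  constructor <;> intro h a ha hb <;> simp_all

lemma pv_diff_iff_inter_right (s1 s2 : List Int) (h1 : s1.Nodup) (h2 : s2.Nodup) :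
    (PySem.Set.diff s2 s1).length = 0 ↔ (PySem.Set.inter s1 s2).length = s2.length := by
  rw [List.length_eq_zero_iff]
  have hnd : (PySem.Set.inter s1 s2).Nodup := by
    unfold PySem.Set.inter; exact h1.filter _
  have hmem : ∀ x, x ∈ PySem.Set.inter s1 s2 ↔ x ∈ s1 ∧ x ∈ s2 := fun x => PySem.Set.mem_inter s1 s2 x
  constructor
  · intro h
    have hsub : ∀ x ∈ s2, x ∈ s1 := by
      intro x hx
      by_contra hns
      have : x ∈ PySem.Set.diff s2 s1 := (PySem.Set.mem_diff s2 s1 x).2 ⟨hx, hns⟩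
      simp [h] at this
    have hperm : (PySem.Set.inter s1 s2).Perm s2 := by
      rw [List.perm_ext_iff_of_nodup hnd h2]
      intro a; rw [hmem a]
      exact ⟨fun h => h.2, fun h => ⟨hsub a h, h⟩⟩
    exact hperm.length_eq
  · intro hlen
    have hsp : List.Subperm (PySem.Set.inter s1 s2) s2 :=
      hnd.subperm (fun x hx => ((hmem x).1 hx).2)
    have hperm : (PySem.Set.inter s1 s2).Perm s2 := hsp.perm_of_length_le (le_of_eq hlen.symm)
    have hsub : ∀ x ∈ s2, x ∈ s1 := fun x hx => ((hmem x).1 (hperm.mem_iff.2 hx)).1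
    simp only [PySem.Set.diff, List.filter_eq_nil_iff]
    intro a ha
    simp [PySem.Set.contains, hsub a ha]

-- A's diff/inter branch chain classified by the single cardinality |s1 ∩ s2|
lemma pv_stepA_by_card (out : List (List Int × String × List Int)) (p1 p2 : List Int) :
    pvStepA out [p1, p2] =
      (let c : Int := ((PySem.Set.inter (PySem.Set.ofList p1) (PySem.Set.ofList p2)).length : Int)
       if c = ((PySem.Set.ofList p1).length : Int) then PySem.Set.add out (p1, "subset", p2)
       else if c = ((PySem.Set.ofList p2).length : Int) then PySem.Set.add out (p2, "subset", p1)
       else if c ≠ 0 then PySem.Set.add out (p1, "overlap", p2)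
       else out) := by
  have hn1 := PySem.Set.nodup_ofList p1
  have hn2 := PySem.Set.nodup_ofList p2
  have e1 : (PySem.Set.diff (PySem.Set.ofList p1) (PySem.Set.ofList p2) = []) ↔
      ((PySem.Set.inter (PySem.Set.ofList p1) (PySem.Set.ofList p2)).length = (PySem.Set.ofList p1).length) := by
    rw [← List.length_eq_zero_iff]; exact pv_diff_iff_inter_left _ _
  have e2 : (PySem.Set.diff (PySem.Set.ofList p2) (PySem.Set.ofList p1) = []) ↔
      ((PySem.Set.inter (PySem.Set.ofList p1) (PySem.Set.ofList p2)).length = (PySem.Set.ofList p2).length) := by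
    rw [← List.length_eq_zero_iff]; exact pv_diff_iff_inter_right _ _ hn1 hn2
  have e3 : (PySem.Set.inter (PySem.Set.ofList p2) (PySem.Set.ofList p1) = []) ↔
      ((PySem.Set.inter (PySem.Set.ofList p1) (PySem.Set.ofList p2)).length = 0) := pv_inter_comm_nil _ _
  simp only [pvStepA, PySem.Set.len, Nat.cast_inj, Nat.cast_eq_zero, ne_eq,
    List.length_eq_zero_iff, e1, e2, e3]

-- ---- both pair loops are the head-vs-tail recursion pvLoop2 ----

-- the common shape of both pair loops: head against the tail, then recurse on the tail
def pvLoop2 {α σ : Type} (g : σ → α → α → σ) : List α → σ → σ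
  | [], a => a
  | x :: xs, a => pvLoop2 g xs (xs.foldl (fun a y => g a x y) a)

lemma pvA_loop2 (l : List (List Int)) (acc : List (List Int × String × List Int)) :
    (PySem.List.combinations l 2).foldl pvStepA acc
      = pvLoop2 (fun a x y => pvStepA a [x, y]) l acc := by
  induction l generalizing acc with
  | nil => rfl
  | cons x xs ih =>
    rw [PySem.List.combinations_cons_succ, PySem.List.combinations_one, List.foldl_append,
      List.map_map, List.foldl_map]
    exact ih _

lemma pvLoop2_map {α β σ : Type} (g : σ → β → β → σ) (f : α → β) (l : List α) (acc : σ) :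
    pvLoop2 g (l.map f) acc = pvLoop2 (fun a x y => g a (f x) (f y)) l acc := by
  induction l generalizing acc with
  | nil => rfl
  | cons x xs ih =>
    simp only [List.map_cons, pvLoop2, List.foldl_map]
    exact ih _

lemma pvLoop2_congr_lt {σ : Type} (g g' : σ → Nat → Nat → σ) (l : List Nat)
    (hl : l.Pairwise (· < ·))
    (h : ∀ acc x y, x ∈ l → y ∈ l → x < y → g acc x y = g' acc x y) (acc : σ) :
    pvLoop2 g l acc = pvLoop2 g' l acc := by
  induction l generalizing acc with
  | nil => rfl
  | cons x xs ih =>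
    rw [List.pairwise_cons] at hl
    simp only [pvLoop2]
    rw [PySem.List.foldl_congr_mem xs _ _ acc
      (fun a y hy => h a x y List.mem_cons_self (List.mem_cons_of_mem _ hy) (hl.1 y hy))]
    exact ih hl.2 (fun a u v hu hv huv =>
      h a u v (List.mem_cons_of_mem _ hu) (List.mem_cons_of_mem _ hv) huv) _

lemma pvPyRange_natCast (a n : Nat) :
    PySem.List.pyRange (a : Int) (n : Int) = ((List.range n).drop a).map (fun k : Nat => (k : Int)) := by
  by_cases h : a ≤ n
  · have happ := PySem.List.pyRange_one_append 0 (a : Int) (n : Int)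
      (by exact_mod_cast Nat.zero_le a) (by exact_mod_cast h)
    rw [PySem.List.pyRange_zero_natCast, PySem.List.pyRange_zero_natCast] at happ
    have hsplit : (List.range n).map (fun k : Nat => (k : Int))
        = (List.range a).map (fun k : Nat => (k : Int)) ++ ((List.range n).drop a).map (fun k : Nat => (k : Int)) := by
      conv_lhs => rw [← List.take_append_drop a (List.range n)]
      rw [List.map_append, List.take_range, Nat.min_eq_left h]
    rw [hsplit] at happ
    exact (List.append_cancel_left happ).symm
  · have h1 : PySem.List.pyRange (a : Int) (n : Int) = [] := by
      rw [List.eq_nil_iff_forall_not_mem]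
      intro x hx
      rw [PySem.List.mem_pyRange_one] at hx
      omega
    have h2 : (List.range n).drop a = [] :=
      List.drop_eq_nil_of_le (by simpa using Nat.le_of_not_le h)
    rw [h1, h2, List.map_nil]

lemma pvB_aux {σ : Type} (g : σ → Nat → Nat → σ) (n : Nat) :
    ∀ (k a : Nat), n - a ≤ k → ∀ (acc : σ),
    (((List.range n).drop a).foldl
      (fun out i => (((List.range n).drop (i + 1)).foldl (fun out b => g out i b) out)) acc)
      = pvLoop2 g ((List.range n).drop a) acc := by
  intro k
  induction k with
  | zero =>
    intro a hk acc
    have : (List.range n).drop a = [] :=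
      List.drop_eq_nil_of_le (by simp only [List.length_range]; omega)
    rw [this]; rfl
  | succ k ih =>
    intro a hk acc
    by_cases ha : a < n
    · have hcons : (List.range n).drop a = a :: (List.range n).drop (a + 1) := by
        rw [List.drop_eq_getElem_cons (by simpa using ha)]
        simp
      rw [hcons]
      simp only [List.foldl_cons, pvLoop2]
      exact ih (a + 1) (by omega) _
    · have : (List.range n).drop a = [] := List.drop_eq_nil_of_le (by simpa using Nat.le_of_not_lt ha)
      rw [this]; rfl

lemma pvB_loop2 {σ : Type} (g : σ → Nat → Nat → σ) (n : Nat) (acc : σ) :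
    (List.range n).foldl
      (fun out a => (((List.range n).drop (a + 1)).foldl (fun out b => g out a b) out)) acc
      = pvLoop2 g (List.range n) acc := by
  have := pvB_aux g n n 0 (by omega) acc
  simpa using this

-- ---- assembly ----

lemma pv_main (keys : List (List Int)) :
    (PySem.List.combinations keys 2).foldl pvStepA PySem.Set.empty
      = (PySem.List.pyRange 0 (PySem.List.len keys)).foldl
          (fun out i => (PySem.List.pyRange (i + 1) (PySem.List.len keys)).foldl
            (fun out j =>
              let c := (pvBuildCounts (pvBuildIndex keys).2).getD (i, j) 0
              if c = PySem.List.pyGetD (pvBuildIndex keys).1 i 0 then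
                PySem.Set.add out (PySem.List.pyGetD keys i [], "subset", PySem.List.pyGetD keys j [])
              else if c = PySem.List.pyGetD (pvBuildIndex keys).1 j 0 then
                PySem.Set.add out (PySem.List.pyGetD keys j [], "subset", PySem.List.pyGetD keys i [])
              else if c ≠ 0 then
                PySem.Set.add out (PySem.List.pyGetD keys i [], "overlap", PySem.List.pyGetD keys j [])
              else out)
            out)
          PySem.Set.empty := by
  have hlen : PySem.List.len keys = (keys.length : Int) := by
    simp [PySem.List.len]
  -- B side: nested pyRanges over Int indices = pvLoop2 over range keys.length
  rw [hlen]
  have hB : (PySem.List.pyRange 0 (keys.length : Int)).foldl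
      (fun out i => (PySem.List.pyRange (i + 1) (keys.length : Int)).foldl
        (fun out j =>
          let c := (pvBuildCounts (pvBuildIndex keys).2).getD (i, j) 0
          if c = PySem.List.pyGetD (pvBuildIndex keys).1 i 0 then
            PySem.Set.add out (PySem.List.pyGetD keys i [], "subset", PySem.List.pyGetD keys j [])
          else if c = PySem.List.pyGetD (pvBuildIndex keys).1 j 0 then
            PySem.Set.add out (PySem.List.pyGetD keys j [], "subset", PySem.List.pyGetD keys i [])
          else if c ≠ 0 then
            PySem.Set.add out (PySem.List.pyGetD keys i [], "overlap", PySem.List.pyGetD keys j [])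
          else out)
        out)
      PySem.Set.empty
      = pvLoop2 (fun out (x y : Nat) =>
          let c := (pvBuildCounts (pvBuildIndex keys).2).getD ((x : Int), (y : Int)) 0
          if c = PySem.List.pyGetD (pvBuildIndex keys).1 (x : Int) 0 then
            PySem.Set.add out (PySem.List.pyGetD keys (x : Int) [], "subset", PySem.List.pyGetD keys (y : Int) [])
          else if c = PySem.List.pyGetD (pvBuildIndex keys).1 (y : Int) 0 then
            PySem.Set.add out (PySem.List.pyGetD keys (y : Int) [], "subset", PySem.List.pyGetD keys (x : Int) [])
          else if c ≠ 0 then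
            PySem.Set.add out (PySem.List.pyGetD keys (x : Int) [], "overlap", PySem.List.pyGetD keys (y : Int) [])
          else out)
        (List.range keys.length) PySem.Set.empty := by
    rw [PySem.List.pyRange_zero_natCast, List.foldl_map]
    rw [← pvB_loop2]
    apply PySem.List.foldl_congr_mem
    intro out x _
    have : ((x : Int) + 1) = ((x + 1 : Nat) : Int) := by push_cast; ring
    rw [this, pvPyRange_natCast, List.foldl_map]
  rw [hB, pvA_loop2]
  have hkeys : keys = (List.range keys.length).map (fun x => keys.getD x []) := by
    apply List.ext_getElem
    · simp
    · intro i h1 h2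
      simp only [List.getElem_map, List.getElem_range]
      exact (List.getD_eq_getElem _ _ (by simpa using h1)).symm
  conv_lhs => rw [hkeys]
  rw [pvLoop2_map]
  apply pvLoop2_congr_lt _ _ _ (List.pairwise_lt_range)
  intro acc x y hx hy hxy
  rw [List.mem_range] at hx hy
  have hgx : keys.getD x [] = keys[x] := List.getD_eq_getElem _ _ hx
  have hgy : keys.getD y [] = keys[y] := List.getD_eq_getElem _ _ hy
  have hszx : (keys.map (fun k => ((PySem.List.dedup k).length : Int))).getD x 0
      = ((PySem.List.dedup keys[x]).length : Int) := by
    rw [List.getD_eq_getElem _ _ (by simpa using hx)]; simp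
  have hszy : (keys.map (fun k => ((PySem.List.dedup k).length : Int))).getD y 0
      = ((PySem.List.dedup keys[y]).length : Int) := by
    rw [List.getD_eq_getElem _ _ (by simpa using hy)]; simp
  simp only [PySem.List.pyGetD_natCast, pvBuildIndex_fst, hszx, hszy,
    pvCounts_getD keys x y hx hy hxy, hgx, hgy]
  rw [pv_stepA_by_card]
  simp only [PySem.List.dedup_eq_ofList]
  rfl

-- ===== VERDICT (by name: the statement is the Claim_ definition above) =====
theorem detect_path_overlaps_spec : Claim_equal_detect_path_overlaps := by
  intro g _
  unfold Spec_detect_path_overlaps detect_path_overlaps detect_path_overlaps_alt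
  exact pv_main _
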